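-- pv_equiv track=rewrite | github.com/svortega/steelpy | steelpy/ufo/load/process/utils.py | get_value_point
-- ===== SOURCE A (Python) =====
-- def get_value_point(data, label:str, steps:int):
--     """ """
--     new_data = []
--     for x in range(steps):
--         try:
--             new_data.append(data[label][x])
--         except IndexError:
--             new_data.append(0)
--     #
--     if not new_data:
--         new_data = [0] * steps
--     return new_data
-- ===== SOURCE B (Python) =====
-- def get_value_point(data, label: str, steps: int):
--     """Prefix-slice then zero-pad instead of the element-by-element try/except loop."""
--     if steps <= 0:
--         return []
--     seq = data[label]
--     res = list(seq[:steps])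
--     res += [0] * (steps - len(res))
--     return res
-- ===== Notes on version B (the rewrite author's own statement) =====
-- stated objective: simpler
-- what changed: Replaces the per-index try/except-IndexError append loop with a single prefix slice seq[:steps] followed by zero padding, after an early return [] for steps <= 0.
import Mathlib
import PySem

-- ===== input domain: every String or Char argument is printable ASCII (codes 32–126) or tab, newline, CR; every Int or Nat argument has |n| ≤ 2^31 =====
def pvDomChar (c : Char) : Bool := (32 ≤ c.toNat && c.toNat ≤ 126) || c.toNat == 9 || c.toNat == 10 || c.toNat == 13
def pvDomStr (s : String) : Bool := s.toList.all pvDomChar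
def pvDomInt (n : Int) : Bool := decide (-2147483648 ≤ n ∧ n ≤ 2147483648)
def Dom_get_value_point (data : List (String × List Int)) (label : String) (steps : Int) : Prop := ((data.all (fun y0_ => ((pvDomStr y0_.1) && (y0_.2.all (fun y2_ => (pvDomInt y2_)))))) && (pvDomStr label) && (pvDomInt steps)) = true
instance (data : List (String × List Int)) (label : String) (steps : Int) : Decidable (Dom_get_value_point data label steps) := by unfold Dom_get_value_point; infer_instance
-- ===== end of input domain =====

-- B replaces A's per-index try/except-IndexError loop by a prefix slice plus zero padding (objective: simpler).


-- ===== PORT A =====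
-- for x in range(steps): new_data.append(data[label][x]) with IndexError → 0;
-- then if not new_data: new_data = [0]*steps. (data[label] lookup totalized via getD [];
-- Pre_ excludes the KeyError case where the lookup actually fails.)
def get_value_point (data : List (String × List Int)) (label : String) (steps : Int) : List Int :=
  let new_data := (PySem.List.pyRange 0 steps 1).foldl
    (fun acc x => acc ++ [PySem.List.pyGetD (((PySem.Dict.mk data).get? label).getD []) x 0]) []
  if new_data = [] then PySem.List.pyRepeat [0] steps else new_data

-- ===== PORT B =====
def get_value_point_alt (data : List (String × List Int)) (label : String) (steps : Int) : List Int :=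
  if steps ≤ 0 then []
  else
    let seq := ((PySem.Dict.mk data).get? label).getD []
    let res := PySem.List.slice seq none (some steps)
    res ++ PySem.List.pyRepeat [0] (steps - res.length)

-- ===== PRECONDITION & SPEC =====
-- Pre_ excludes exactly the inputs where Python A raises KeyError: steps > 0 with label absent from data.
def Pre_get_value_point (data : List (String × List Int)) (label : String) (steps : Int) : Prop :=
  steps ≤ 0 ∨ label ∈ data.map Prod.fst
instance (data : List (String × List Int)) (label : String) (steps : Int) : Decidable (Pre_get_value_point data label steps) := by unfold Pre_get_value_point; infer_instance
def pvWitness_get_value_point : (List (String × List Int)) × String × Int := ([("a", [1, 2])], "a", 4)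

def Spec_get_value_point (data : List (String × List Int)) (label : String) (steps : Int) (out : List Int) : Prop := out = get_value_point_alt data label steps
instance (data : List (String × List Int)) (label : String) (steps : Int) (out : List Int) : Decidable (Spec_get_value_point data label steps out) := by unfold Spec_get_value_point; infer_instance

-- ===== CLAIM (what is proved, stated in full; the proofs are below) =====
def Claim_equal_get_value_point : Prop := ∀ (data : List (String × List Int)) (label : String) (steps : Int), Dom_get_value_point data label steps → Pre_get_value_point data label steps → Spec_get_value_point data label steps (get_value_point data label steps)

-- ===== LEMMAS AND PROOFS =====

-- the loop's result: indexing 0..n-1 into seq with default 0 is the n-prefix padded with zeros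
theorem gvp_map_range_getD (seq : List Int) (n : Nat) :
    (List.range n).map (fun k => seq.getD k 0) =
      seq.take n ++ List.replicate (n - seq.length) 0 := by
  apply List.ext_getElem
  · simp [List.length_take]; omega
  · intro i h1 h2
    simp only [List.length_map, List.length_range] at h1
    simp only [List.getElem_map, List.getElem_range]
    by_cases hi : i < seq.length
    · rw [List.getD_eq_getElem seq 0 hi,
        List.getElem_append_left (by rw [List.length_take]; omega)]
      simp [List.getElem_take]
    · rw [List.getD_eq_default seq 0 (by omega),
        List.getElem_append_right (by rw [List.length_take]; omega)]
      simp

theorem gvp_loop_eq (seq : List Int) (steps : Int) (h : 0 < steps) :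
    (PySem.List.pyRange 0 steps 1).foldl
      (fun acc x => acc ++ [PySem.List.pyGetD seq x 0]) [] =
      seq.take steps.toNat ++ List.replicate (steps.toNat - seq.length) 0 := by
  rw [PySem.List.foldl_append_singleton_eq_map, PySem.List.pyRange_one]
  simp only [List.nil_append, List.map_map, Function.comp, Int.sub_zero]
  rw [← gvp_map_range_getD seq steps.toNat]
  apply List.map_congr_left
  intro k _
  simp [PySem.List.pyGetD_natCast]

-- ===== VERDICT (by name: the statement is the Claim_ definition above) =====
theorem get_value_point_spec : Claim_equal_get_value_point := by
  intro data label steps _ _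
  unfold Spec_get_value_point get_value_point get_value_point_alt
  by_cases h : steps ≤ 0
  · rw [PySem.List.pyRange_one_eq_nil (by omega)]
    simp [h, PySem.List.pyRepeat, Int.toNat_of_nonpos h]
  · push_neg at h
    set seq := ((PySem.Dict.mk data).get? label).getD [] with hseq
    rw [gvp_loop_eq seq steps h]
    have hlen : (seq.take steps.toNat ++ List.replicate (steps.toNat - seq.length) 0).length
        = steps.toNat := by
      rw [List.length_append, List.length_take, List.length_replicate]; omega
    have hne : seq.take steps.toNat ++ List.replicate (steps.toNat - seq.length) 0 ≠ [] := by
      intro hc; rw [hc] at hlen; simp at hlen; omega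
    rw [if_neg hne, if_neg (by omega)]
    show seq.take steps.toNat ++ List.replicate (steps.toNat - seq.length) 0 =
      PySem.List.slice seq none (some steps) ++
        PySem.List.pyRepeat [0] (steps - ((PySem.List.slice seq none (some steps)).length : Int))
    have hs : (0:Int) ≤ steps := by omega
    rw [PySem.List.slice_to seq hs, PySem.List.pyRepeat_singleton]
    congr 1
    rw [List.length_take]
    congr 1
    omega
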